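-- pv_equiv track=rewrite | github.com/hvitoi/tech-docs | computer-science/Data Structures/Traversal/Matrix/maze-search-dfs.py | search_maze_dfs_return_path
-- ===== SOURCE A (Python) =====
-- def search_maze_dfs_return_path(
--     maze: list[list], start: tuple[int, int], goal: tuple[int, int]
-- ) -> list[tuple[int, int]]:
--     def search(row, col):
--         if (
--             (row, col) in visited
--             or (not 0 <= row < len_rows)
--             or (not 0 <= col < len_cols)
--             or maze[row][col] == 1
--         ):
--             return []
--
--         if (row, col) == goal:
--             return [(row, col)]
--
--         visited.add((row, col))
--
--         next_positions = [
--             (row - 1, col),  # up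
--             (row, col + 1),  # right
--             (row + 1, col),  # down
--             (row, col - 1),  # left
--         ]
--
--         for pos in next_positions:
--             path = search(*pos)
--             if path:
--                 return [(row, col)] + path
--
--         return []
--
--     len_rows = len(maze)
--     len_cols = len(maze[0])
--     visited = set()
--     return search(*start)
-- ===== SOURCE B (Python) =====
-- def search_maze_dfs_return_path(maze, start, goal):
--     len_rows = len(maze)
--     len_cols = len(maze[0])
--     visited = set()
--     stack = [[start]]
--     while stack:
--         path = stack.pop()
--         row, col = path[-1]
--         if (
--             (row, col) in visited
--             or (not 0 <= row < len_rows)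
--             or (not 0 <= col < len_cols)
--             or maze[row][col] == 1
--         ):
--             continue
--         if (row, col) == goal:
--             return path
--         visited.add((row, col))
--         # push reversed (left, down, right, up) so 'up' is popped first
--         stack.extend([
--             path + [(row, col - 1)],
--             path + [(row + 1, col)],
--             path + [(row, col + 1)],
--             path + [(row - 1, col)],
--         ])
--     return []
-- ===== Notes on version B (the rewrite author's own statement) =====
-- stated objective: alternative
-- what changed: A's recursive DFS (nested closure mutating a shared visited set) is replaced by an iterative while-loop over an explicit stack of paths, pushing the four neighbours in reversed order so the exploration order and the returned path are identical.
-- outside the precondition, e.g. on search_maze_dfs_return_path([[0, 1], [0]], (0, 1), (1, 1)): A returns [], B returns []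
import Mathlib
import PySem

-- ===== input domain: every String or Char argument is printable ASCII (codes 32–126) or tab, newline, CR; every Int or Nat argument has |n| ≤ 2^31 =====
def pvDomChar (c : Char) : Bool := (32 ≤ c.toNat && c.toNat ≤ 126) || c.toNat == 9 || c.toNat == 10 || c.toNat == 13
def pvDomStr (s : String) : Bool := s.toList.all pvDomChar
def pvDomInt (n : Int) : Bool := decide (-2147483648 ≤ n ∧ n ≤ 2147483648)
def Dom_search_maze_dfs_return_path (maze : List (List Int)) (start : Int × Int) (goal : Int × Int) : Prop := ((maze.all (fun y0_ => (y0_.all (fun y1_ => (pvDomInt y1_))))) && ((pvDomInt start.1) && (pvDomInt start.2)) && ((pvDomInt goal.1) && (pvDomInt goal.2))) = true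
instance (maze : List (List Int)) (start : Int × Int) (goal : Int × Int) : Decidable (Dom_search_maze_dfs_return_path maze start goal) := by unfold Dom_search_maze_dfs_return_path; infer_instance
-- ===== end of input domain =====

-- B replaces A's recursive DFS by an iterative loop over an explicit stack of paths (an 'alternative'
-- decomposition with the same visit order and returned path; no speed claim). Return values only;
-- neither version mutates its arguments.

-- shared guard: the Python condition '(row,col) in visited or not 0<=row<rows or not 0<=col<cols
-- or maze[row][col]==1' — identical text in A and in B, so both ports use this one helper
def pvBlocked (maze : List (List Int)) (lr lc : Int) (v : PySem.Set (Int × Int)) (r c : Int) : Bool :=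
  PySem.Set.contains v (r, c) || !(decide (0 ≤ r ∧ r < lr)) || !(decide (0 ≤ c ∧ c < lc)) ||
    (((PySem.List.pyGet? maze r).bind (fun rw => PySem.List.pyGet? rw c)) == some 1)

-- termination machinery for port B (and fuel adequacy of port A):
-- the in-bounds grid cells, and how many of them are not yet visited
def pvCells (lr lc : Int) : List (Int × Int) :=
  (List.range lr.toNat ×ˢ List.range lc.toNat).map (fun p => ((p.1 : Int), (p.2 : Int)))

def pvUnvis (lr lc : Int) (v : PySem.Set (Int × Int)) : Nat :=
  (pvCells lr lc).countP (fun p => !(PySem.Set.contains v p))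

theorem pv_mem_pvCells {lr lc r c : Int} (h1 : 0 ≤ r) (h2 : r < lr) (h3 : 0 ≤ c) (h4 : c < lc) :
    (r, c) ∈ pvCells lr lc := by
  have e : ((((r.toNat, c.toNat) : Nat × Nat).1 : Int), (((r.toNat, c.toNat) : Nat × Nat).2 : Int)) = (r, c) := by
    rw [Prod.ext_iff]; constructor <;> simp <;> omega
  exact List.mem_map.mpr ⟨(r.toNat, c.toNat),
    List.mem_product.mpr ⟨List.mem_range.mpr (by omega), List.mem_range.mpr (by omega)⟩, e⟩

-- strict version of List.countP_mono_left: one element flips from counted to uncounted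
theorem pv_countP_lt {α : Type} {l : List α} {p q : α → Bool}
    (himp : ∀ x ∈ l, p x = true → q x = true) {c : α} (hc : c ∈ l)
    (hq : q c = true) (hp : p c = false) :
    l.countP p < l.countP q := by
  induction l with
  | nil => cases hc
  | cons a l ih =>
    rw [List.countP_cons, List.countP_cons]
    rcases List.mem_cons.mp hc with hc | hc
    · subst hc
      rw [hp, hq]
      have := List.countP_mono_left (fun x hx => himp x (List.mem_cons_of_mem _ hx))
      simp only [Bool.false_eq_true, if_false, if_true]
      omega
    · have := ih (fun x hx => himp x (List.mem_cons_of_mem _ hx)) hc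
      have hpq := himp a List.mem_cons_self
      by_cases hpa : p a = true
      · rw [if_pos hpa, if_pos (hpq hpa)]; omega
      · rw [if_neg hpa]; split_ifs <;> omega

theorem pv_contains_add_false {v : PySem.Set (Int × Int)} {x y : Int × Int}
    (h : PySem.Set.contains (PySem.Set.add v x) y = false) : PySem.Set.contains v y = false := by
  by_contra hc
  rw [Bool.not_eq_false, PySem.Set.contains_iff] at hc
  rw [Bool.eq_false_iff, Ne, PySem.Set.contains_iff, PySem.Set.mem_add] at h
  exact h (Or.inl hc)

theorem pvUnvis_add_lt {lr lc r c : Int} {v : PySem.Set (Int × Int)}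
    (h0 : PySem.Set.contains v (r, c) = false)
    (h1 : 0 ≤ r) (h2 : r < lr) (h3 : 0 ≤ c) (h4 : c < lc) :
    pvUnvis lr lc (PySem.Set.add v (r, c)) < pvUnvis lr lc v := by
  have hnm : (r, c) ∉ v := by
    intro hm
    rw [← PySem.Set.contains_iff, h0] at hm
    cases hm
  apply pv_countP_lt (c := (r, c)) _ (pv_mem_pvCells h1 h2 h3 h4)
  · simp [hnm]
  · simp [PySem.Set.mem_add]
  · intro x _ hx
    simp only [Bool.not_eq_true'] at hx ⊢
    exact pv_contains_add_false hx

-- ===== PORT A =====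
-- A's recursive 'search', with the mutable global 'visited' threaded through as state; the literal
-- 4-element neighbour loop is unrolled into its four sequential attempts; fuel bounds the recursion
-- depth (one unit per newly visited cell, so rows*cols+1 always suffices — used in the proofs below).
def pvSearchA (maze : List (List Int)) (lr lc : Int) (goal : Int × Int) :
    Nat → PySem.Set (Int × Int) → Int → Int → PySem.Set (Int × Int) × List (Int × Int)
  | f, v, r, c =>
    if pvBlocked maze lr lc v r c then (v, [])
    else if (r, c) = goal then (v, [(r, c)])
    else
      match f with
      | 0 => (v, [])
      | f + 1 =>
        let v0 := PySem.Set.add v (r, c)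
        let s1 := pvSearchA maze lr lc goal f v0 (r - 1) c
        if s1.2 ≠ [] then (s1.1, (r, c) :: s1.2) else
        let s2 := pvSearchA maze lr lc goal f s1.1 r (c + 1)
        if s2.2 ≠ [] then (s2.1, (r, c) :: s2.2) else
        let s3 := pvSearchA maze lr lc goal f s2.1 (r + 1) c
        if s3.2 ≠ [] then (s3.1, (r, c) :: s3.2) else
        let s4 := pvSearchA maze lr lc goal f s3.1 r (c - 1)
        if s4.2 ≠ [] then (s4.1, (r, c) :: s4.2) else
        (s4.1, [])

def search_maze_dfs_return_path (maze : List (List Int)) (start : Int × Int) (goal : Int × Int) : List (Int × Int) :=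
  let lr : Int := maze.length
  let lc : Int := (maze.headD []).length
  (pvSearchA maze lr lc goal (lr.toNat * lc.toNat + 1) PySem.Set.empty start.1 start.2).2

-- ===== PORT B =====
-- B's while loop over an explicit stack of paths (head of the list = top of the stack)
def pvLoopB (maze : List (List Int)) (lr lc : Int) (goal : Int × Int) :
    PySem.Set (Int × Int) → List (List (Int × Int)) → List (Int × Int)
  | _, [] => []
  | v, path :: rest =>
    match path.getLast? with
    | none => pvLoopB maze lr lc goal v rest   -- unreachable: every stacked path is nonempty
    | some (r, c) =>
      if hB : pvBlocked maze lr lc v r c then pvLoopB maze lr lc goal v rest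
      else if (r, c) = goal then path
      else pvLoopB maze lr lc goal (PySem.Set.add v (r, c))
        ((path ++ [(r - 1, c)]) :: (path ++ [(r, c + 1)]) :: (path ++ [(r + 1, c)]) :: (path ++ [(r, c - 1)]) :: rest)
  termination_by v stack => (pvUnvis lr lc v, stack.length)
  decreasing_by
  · exact Prod.Lex.right _ (by simp)
  · apply Prod.Lex.left
    simp only [pvBlocked, Bool.or_eq_true, Bool.not_eq_true', decide_eq_false_iff_not, not_or,
      not_not, Bool.not_eq_true, beq_eq_false_iff_ne, ne_eq] at hB
    obtain ⟨⟨⟨hc0, hr1, hr2⟩, hc1, hc2⟩, -⟩ := hB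
    exact pvUnvis_add_lt hc0 hr1 hr2 hc1 hc2

def search_maze_dfs_return_path_alt (maze : List (List Int)) (start : Int × Int) (goal : Int × Int) : List (Int × Int) :=
  let lr : Int := maze.length
  let lc : Int := (maze.headD []).length
  pvLoopB maze lr lc goal PySem.Set.empty [[start]]

-- ===== PRECONDITION & SPEC =====
-- Pre_ excludes the inputs where Python A can raise IndexError: the empty maze (maze[0]), and ragged
-- mazes (a row shorter than row 0) entered at an in-bounds start, where the search can index a short
-- row (on some such inputs A happens to return [] before reaching a short row; those are excluded too).
def Pre_search_maze_dfs_return_path (maze : List (List Int)) (start : Int × Int) (goal : Int × Int) : Prop :=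
  maze ≠ [] ∧ ((∀ row ∈ maze, (maze.headD []).length ≤ row.length) ∨
    ¬(0 ≤ start.1 ∧ start.1 < (maze.length : Int) ∧ 0 ≤ start.2 ∧ start.2 < ((maze.headD []).length : Int)))
instance (maze : List (List Int)) (start : Int × Int) (goal : Int × Int) : Decidable (Pre_search_maze_dfs_return_path maze start goal) := by unfold Pre_search_maze_dfs_return_path; infer_instance

def pvWitness_search_maze_dfs_return_path : List (List Int) × (Int × Int) × (Int × Int) :=
  ([[0, 0], [1, 0]], (0, 0), (1, 1))

def Spec_search_maze_dfs_return_path (maze : List (List Int)) (start : Int × Int) (goal : Int × Int) (out : List (Int × Int)) : Prop := out = search_maze_dfs_return_path_alt maze start goal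
instance (maze : List (List Int)) (start : Int × Int) (goal : Int × Int) (out : List (Int × Int)) : Decidable (Spec_search_maze_dfs_return_path maze start goal out) := by unfold Spec_search_maze_dfs_return_path; infer_instance

-- ===== CLAIM (what is proved, stated in full; the proofs are below) =====
def Claim_equal_search_maze_dfs_return_path : Prop := ∀ (maze : List (List Int)) (start : Int × Int) (goal : Int × Int), Dom_search_maze_dfs_return_path maze start goal → Pre_search_maze_dfs_return_path maze start goal → Spec_search_maze_dfs_return_path maze start goal (search_maze_dfs_return_path maze start goal)

-- ===== LEMMAS AND PROOFS =====

theorem pvUnvis_add_le (lr lc : Int) (v : PySem.Set (Int × Int)) (x : Int × Int) :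
    pvUnvis lr lc (PySem.Set.add v x) ≤ pvUnvis lr lc v := by
  apply List.countP_mono_left
  intro y _ hy
  simp only [Bool.not_eq_true'] at hy ⊢
  exact pv_contains_add_false hy

-- A's recursion only ever grows 'visited'
theorem pvSearchA_mono (maze : List (List Int)) (lr lc : Int) (goal : Int × Int) :
    ∀ (f : Nat) (v : PySem.Set (Int × Int)) (r c : Int),
      pvUnvis lr lc (pvSearchA maze lr lc goal f v r c).1 ≤ pvUnvis lr lc v := by
  intro f
  induction f with
  | zero =>
    intro v r c
    rw [pvSearchA]
    split_ifs <;> exact le_rfl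
  | succ f ih =>
    intro v r c
    rw [pvSearchA]
    split_ifs with h1 h2
    · exact le_rfl
    · exact le_rfl
    · dsimp only
      have h0 := pvUnvis_add_le lr lc v (r, c)
      have m1 := ih (PySem.Set.add v (r, c)) (r - 1) c
      have m2 := ih (pvSearchA maze lr lc goal f (PySem.Set.add v (r, c)) (r - 1) c).1 r (c + 1)
      have m3 := ih (pvSearchA maze lr lc goal f (pvSearchA maze lr lc goal f (PySem.Set.add v (r, c)) (r - 1) c).1 r (c + 1)).1 (r + 1) c
      have m4 := ih (pvSearchA maze lr lc goal f (pvSearchA maze lr lc goal f (pvSearchA maze lr lc goal f (PySem.Set.add v (r, c)) (r - 1) c).1 r (c + 1)).1 (r + 1) c).1 r (c - 1)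
      split_ifs <;> simp <;> omega

-- the simulation: popping 'path' (ending in (r,c)) off the stack behaves like the recursive call
-- search(r, c) — success returns path.dropLast ++ (the recursive path), failure continues with the
-- rest of the stack and the grown visited set
theorem pv_sim (maze : List (List Int)) (lr lc : Int) (goal : Int × Int) :
    ∀ (f : Nat) (v : PySem.Set (Int × Int)) (path : List (Int × Int)) (rest : List (List (Int × Int))) (r c : Int),
      pvUnvis lr lc v < f → path.getLast? = some (r, c) →
      pvLoopB maze lr lc goal v (path :: rest) =
        (if (pvSearchA maze lr lc goal f v r c).2 = [] then
           pvLoopB maze lr lc goal (pvSearchA maze lr lc goal f v r c).1 rest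
         else path.dropLast ++ (pvSearchA maze lr lc goal f v r c).2) := by
  intro f
  induction f with
  | zero =>
    intro v path rest r c hf _
    exact absurd hf (Nat.not_lt_zero _)
  | succ f ih =>
    intro v path rest r c hf hlast
    rw [pvLoopB, hlast]
    dsimp only
    by_cases hb : pvBlocked maze lr lc v r c = true
    · rw [dif_pos hb, pvSearchA, if_pos hb]
      simp
    · rw [dif_neg hb]
      rw [pvSearchA, if_neg hb]
      by_cases hg : (r, c) = goal
      · rw [if_pos hg, if_pos hg, if_neg (by simp : ¬ ([(r, c)] : List (Int × Int)) = [])]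
        exact (List.dropLast_append_getLast? _ hlast).symm
      · rw [if_neg hg, if_neg hg]
        dsimp only
        have hbb := hb
        simp only [pvBlocked, Bool.or_eq_true, Bool.not_eq_true', decide_eq_false_iff_not, not_or,
          not_not, Bool.not_eq_true, beq_eq_false_iff_ne, ne_eq] at hbb
        obtain ⟨⟨⟨hc0, hr1, hr2⟩, hc1, hc2⟩, -⟩ := hbb
        have hu0 : pvUnvis lr lc (PySem.Set.add v (r, c)) < f := by
          have := pvUnvis_add_lt hc0 hr1 hr2 hc1 hc2; omega
        have hpath : path.dropLast ++ [(r, c)] = path := List.dropLast_append_getLast? _ hlast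
        -- neighbour 1: up
        rw [ih (PySem.Set.add v (r, c)) (path ++ [(r - 1, c)]) _ (r - 1) c hu0 List.getLast?_concat]
        by_cases e1 : (pvSearchA maze lr lc goal f (PySem.Set.add v (r, c)) (r - 1) c).2 = []
        case neg =>
          rw [if_neg e1, if_pos e1, if_neg (by simp)]
          rw [List.dropLast_concat, ← hpath, List.append_assoc]
          simp
        case pos =>
          rw [if_pos e1, if_neg (not_not_intro e1)]
          have hu1 : pvUnvis lr lc (pvSearchA maze lr lc goal f (PySem.Set.add v (r, c)) (r - 1) c).1 < f :=
            lt_of_le_of_lt (pvSearchA_mono maze lr lc goal f _ _ _) hu0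
          -- neighbour 2: right
          rw [ih _ (path ++ [(r, c + 1)]) _ r (c + 1) hu1 List.getLast?_concat]
          by_cases e2 : (pvSearchA maze lr lc goal f (pvSearchA maze lr lc goal f (PySem.Set.add v (r, c)) (r - 1) c).1 r (c + 1)).2 = []
          case neg =>
            rw [if_neg e2, if_pos e2, if_neg (by simp)]
            rw [List.dropLast_concat, ← hpath, List.append_assoc]
            simp
          case pos =>
            rw [if_pos e2, if_neg (not_not_intro e2)]
            have hu2 : pvUnvis lr lc (pvSearchA maze lr lc goal f (pvSearchA maze lr lc goal f (PySem.Set.add v (r, c)) (r - 1) c).1 r (c + 1)).1 < f :=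
              lt_of_le_of_lt (pvSearchA_mono maze lr lc goal f _ _ _) hu1
            -- neighbour 3: down
            rw [ih _ (path ++ [(r + 1, c)]) _ (r + 1) c hu2 List.getLast?_concat]
            by_cases e3 : (pvSearchA maze lr lc goal f (pvSearchA maze lr lc goal f (pvSearchA maze lr lc goal f (PySem.Set.add v (r, c)) (r - 1) c).1 r (c + 1)).1 (r + 1) c).2 = []
            case neg =>
              rw [if_neg e3, if_pos e3, if_neg (by simp)]
              rw [List.dropLast_concat, ← hpath, List.append_assoc]
              simp
            case pos =>
              rw [if_pos e3, if_neg (not_not_intro e3)]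
              have hu3 : pvUnvis lr lc (pvSearchA maze lr lc goal f (pvSearchA maze lr lc goal f (pvSearchA maze lr lc goal f (PySem.Set.add v (r, c)) (r - 1) c).1 r (c + 1)).1 (r + 1) c).1 < f :=
                lt_of_le_of_lt (pvSearchA_mono maze lr lc goal f _ _ _) hu2
              -- neighbour 4: left
              rw [ih _ (path ++ [(r, c - 1)]) _ r (c - 1) hu3 List.getLast?_concat]
              by_cases e4 : (pvSearchA maze lr lc goal f (pvSearchA maze lr lc goal f (pvSearchA maze lr lc goal f (pvSearchA maze lr lc goal f (PySem.Set.add v (r, c)) (r - 1) c).1 r (c + 1)).1 (r + 1) c).1 r (c - 1)).2 = []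
              case neg =>
                rw [if_neg e4, if_pos e4, if_neg (by simp)]
                rw [List.dropLast_concat, ← hpath, List.append_assoc]
                simp
              case pos =>
                rw [if_pos e4, if_neg (not_not_intro e4)]
                simp

-- ===== VERDICT (by name: the statement is the Claim_ definition above) =====
theorem search_maze_dfs_return_path_spec : Claim_equal_search_maze_dfs_return_path := by
  intro maze start goal _hdom _hpre
  unfold Spec_search_maze_dfs_return_path
  unfold search_maze_dfs_return_path search_maze_dfs_return_path_alt
  dsimp only
  have hlen : (pvCells (maze.length : Int) ((maze.headD []).length : Int)).length =
      (maze.length : Int).toNat * ((maze.headD []).length : Int).toNat := by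
    simp [pvCells, List.length_product]
  have hlt : pvUnvis (maze.length : Int) ((maze.headD []).length : Int) PySem.Set.empty <
      (maze.length : Int).toNat * ((maze.headD []).length : Int).toNat + 1 := by
    have := List.countP_le_length
      (p := fun p => !(PySem.Set.contains PySem.Set.empty p))
      (l := pvCells (maze.length : Int) ((maze.headD []).length : Int))
    unfold pvUnvis
    omega
  rw [pv_sim maze (maze.length : Int) ((maze.headD []).length : Int) goal _ PySem.Set.empty
    [start] [] start.1 start.2 hlt (by simp)]
  split_ifs with h
  · rw [h, pvLoopB]
  · simp
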